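-- pv_equiv track=rewrite | github.com/jollyra/advent-of-code | 2016/python/seven.py | get_abas
-- ===== SOURCE A (Python) =====
-- def get_abas(xs):
--     if len(xs) < 3:
--         return []
--     else:
--         h = xs[:3]
--         if h[0] == h[2]:
--             return [h] + get_abas(xs[1:])
--         else:
--             return [] + get_abas(xs[1:])
-- ===== SOURCE B (Python) =====
-- def get_abas(xs):
--     return [a + b + c for a, b, c in zip(xs, xs[1:], xs[2:]) if a == c]
-- ===== Notes on version B (the rewrite author's own statement) =====
-- stated objective: faster
-- what changed: Replaced A's recursion that re-slices the whole string at every step with a single linear comprehension over zip(xs, xs[1:], xs[2:]) keeping only windows whose first and third characters match.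
import Mathlib
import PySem

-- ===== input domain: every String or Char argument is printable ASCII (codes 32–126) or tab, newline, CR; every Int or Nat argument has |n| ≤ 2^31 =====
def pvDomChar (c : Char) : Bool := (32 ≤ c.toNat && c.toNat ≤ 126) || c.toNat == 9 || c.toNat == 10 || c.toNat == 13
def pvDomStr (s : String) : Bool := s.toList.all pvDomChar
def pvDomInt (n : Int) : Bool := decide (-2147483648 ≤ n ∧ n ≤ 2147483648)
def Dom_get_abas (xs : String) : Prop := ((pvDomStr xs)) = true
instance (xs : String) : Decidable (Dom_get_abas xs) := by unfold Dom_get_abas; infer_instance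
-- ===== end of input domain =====

-- B replaces A's O(n^2) re-slicing recursion with one linear pass over zip(xs, xs[1:], xs[2:]).

-- ===== PORT A =====
-- A's recursion over the string's characters: if fewer than 3 remain return [],
-- else look at the first window of 3 and recurse on the tail.
def getAbasARec : List Char → List String
  | a :: b :: c :: rest =>
      if a = c then String.mk [a, b, c] :: getAbasARec (b :: c :: rest)
      else [] ++ getAbasARec (b :: c :: rest)
  | _ => []

def get_abas (xs : String) : List String := getAbasARec xs.toList

-- ===== PORT B =====
-- Source B: [a+b+c for a,b,c in zip(xs, xs[1:], xs[2:]) if a == c]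
def get_abas_alt (xs : String) : List String :=
  let l := xs.toList
  ((l.zip (l.drop 1)).zip (l.drop 2)).filterMap
    (fun p => if p.1.1 = p.2 then some (String.mk [p.1.1, p.1.2, p.2]) else none)

-- ===== PRECONDITION & SPEC =====
def Spec_get_abas (xs : String) (out : List String) : Prop := out = get_abas_alt xs
instance (xs : String) (out : List String) : Decidable (Spec_get_abas xs out) := by unfold Spec_get_abas; infer_instance

-- ===== CLAIM (what is proved, stated in full; the proofs are below) =====
def Claim_equal_get_abas : Prop := ∀ (xs : String), Dom_get_abas xs → Spec_get_abas xs (get_abas xs)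

-- ===== LEMMAS AND PROOFS =====
theorem getAbas_zip_eq (l : List Char) :
    getAbasARec l =
      ((l.zip (l.drop 1)).zip (l.drop 2)).filterMap
        (fun p => if p.1.1 = p.2 then some (String.mk [p.1.1, p.1.2, p.2]) else none) := by
  match l with
  | a :: b :: c :: rest =>
      have ih := getAbas_zip_eq (b :: c :: rest)
      simp only [getAbasARec, List.drop, List.zip_cons_cons, List.filterMap_cons]
      by_cases h : a = c <;> simp [h] at ih ⊢ <;>
        simpa [List.drop] using ih
  | [] => rfl
  | [a] => rfl
  | [a, b] => rfl

-- ===== VERDICT (by name: the statement is the Claim_ definition above) =====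
theorem get_abas_spec : Claim_equal_get_abas := by
  intro xs _
  unfold Spec_get_abas get_abas get_abas_alt
  exact getAbas_zip_eq xs.toList
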